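-- pv_equiv track=rewrite | github.com/frangolindu-byte/eadriaticleague2 | dashboard.py | _calc_resumo
-- ===== SOURCE A (Python) =====
-- from typing import Any, Dict, List
--
-- STATUS_FINALIZADO = "Finalizado"
--
-- def _calc_resumo(data: List[Dict[str, Any]]) -> Dict[str, Dict[str, int]]:
--     resumo: Dict[str, Dict[str, int]] = {}
--     for item in data:
--         liga = item.get("liga", "Desconhecida")
--         if liga not in resumo:
--             resumo[liga] = {"total": 0, "finalizados": 0, "agendados": 0}
--         resumo[liga]["total"] += 1
--         if item.get("status") == STATUS_FINALIZADO:
--             resumo[liga]["finalizados"] += 1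
--         else:
--             resumo[liga]["agendados"] += 1
--     return resumo
-- ===== SOURCE B (Python) =====
-- from typing import Any, Dict, List
--
-- STATUS_FINALIZADO = "Finalizado"
--
-- def _summ(items):
--     total = len(items)
--     fin = sum(1 for i in items if i.get("status") == STATUS_FINALIZADO)
--     return {"total": total, "finalizados": fin, "agendados": total - fin}
--
-- def _calc_resumo(data: List[Dict[str, Any]]) -> Dict[str, Dict[str, int]]:
--     groups: Dict[str, List[Dict[str, Any]]] = {}
--     for item in data:
--         groups.setdefault(item.get("liga", "Desconhecida"), []).append(item)
--     return {liga: _summ(items) for liga, items in groups.items()}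
-- ===== Notes on version B (the rewrite author's own statement) =====
-- stated objective: alternative
-- what changed: B first partitions the matches into per-league buckets (setdefault/append, first-occurrence order), then builds each summary in one reduce over its bucket with agendados derived as total - finalizados, instead of A's single pass that increments three counters in a nested dict.
import Mathlib
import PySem

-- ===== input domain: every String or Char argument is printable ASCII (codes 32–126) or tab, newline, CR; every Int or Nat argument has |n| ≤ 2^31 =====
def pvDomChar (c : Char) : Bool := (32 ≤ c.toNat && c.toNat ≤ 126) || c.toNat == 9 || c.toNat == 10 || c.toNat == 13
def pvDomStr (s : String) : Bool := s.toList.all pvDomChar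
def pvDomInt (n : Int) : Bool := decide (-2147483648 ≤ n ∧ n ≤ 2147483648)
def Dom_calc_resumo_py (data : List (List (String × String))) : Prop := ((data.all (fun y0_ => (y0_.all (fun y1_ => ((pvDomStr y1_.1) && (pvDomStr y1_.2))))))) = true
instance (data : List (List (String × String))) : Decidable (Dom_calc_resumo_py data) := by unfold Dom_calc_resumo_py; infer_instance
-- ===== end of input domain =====

-- B replaces A's single incremental three-counter accumulation by a group-then-reduce:
-- partition into per-league buckets first, then summarize each bucket (alternative decomposition, same cost).

-- ===== PORT A =====
-- loop body of A's single pass (nested dict of counters, created on first sight of a league)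
def calc_resumo_py_step (resumo : PySem.Dict String (PySem.Dict String Int))
    (item : List (String × String)) : PySem.Dict String (PySem.Dict String Int) :=
  let liga := (PySem.Dict.mk item).getD "liga" "Desconhecida"
  let resumo :=
    if resumo.contains liga then resumo
    else resumo.insert liga (PySem.Dict.mk [("total", (0 : Int)), ("finalizados", 0), ("agendados", 0)])
  let resumo := resumo.modify liga (PySem.Dict.mk []) (fun m => m.modify "total" 0 (· + 1))
  if (PySem.Dict.mk item).get? "status" = some "Finalizado" then
    resumo.modify liga (PySem.Dict.mk []) (fun m => m.modify "finalizados" 0 (· + 1))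
  else
    resumo.modify liga (PySem.Dict.mk []) (fun m => m.modify "agendados" 0 (· + 1))

def calc_resumo_py (data : List (List (String × String))) : List (String × List (String × Int)) :=
  ((data.foldl calc_resumo_py_step PySem.Dict.empty).items).map (fun p => (p.1, p.2.items))

-- ===== PORT B =====
-- B's helper _summ: one reduce over a bucket; agendados is derived, not counted
def calc_resumo_py_alt_summ (items : List (List (String × String))) : List (String × Int) :=
  let total : Int := items.length
  let fin : Int := items.countP (fun i => (PySem.Dict.mk i).get? "status" == some "Finalizado")
  [("total", total), ("finalizados", fin), ("agendados", total - fin)]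

-- B's grouping loop: groups.setdefault(liga, []).append(item)
def calc_resumo_py_alt_gstep (g : PySem.Dict String (List (List (String × String))))
    (item : List (String × String)) : PySem.Dict String (List (List (String × String))) :=
  g.modify ((PySem.Dict.mk item).getD "liga" "Desconhecida") [] (· ++ [item])

def calc_resumo_py_alt (data : List (List (String × String))) : List (String × List (String × Int)) :=
  ((data.foldl calc_resumo_py_alt_gstep PySem.Dict.empty).items).map
    (fun p => (p.1, calc_resumo_py_alt_summ p.2))

-- ===== PRECONDITION & SPEC =====
def Spec_calc_resumo_py (data : List (List (String × String))) (out : List (String × List (String × Int))) : Prop := out = calc_resumo_py_alt data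
instance (data : List (List (String × String))) (out : List (String × List (String × Int))) : Decidable (Spec_calc_resumo_py data out) := by unfold Spec_calc_resumo_py; infer_instance

-- ===== CLAIM (what is proved, stated in full; the proofs are below) =====
def Claim_equal_calc_resumo_py : Prop := ∀ (data : List (List (String × String))), Dom_calc_resumo_py data → Spec_calc_resumo_py data (calc_resumo_py data)

-- ===== LEMMAS AND PROOFS =====

-- the league key of an item and A's-summary-of-a-bucket, as used by the invariant
def pvKey (item : List (String × String)) : String :=
  (PySem.Dict.mk item).getD "liga" "Desconhecida"

def pvSumm (xs : List (List (String × String))) : PySem.Dict String Int :=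
  PySem.Dict.mk (calc_resumo_py_alt_summ xs)

lemma pvSumm_nil : pvSumm [] =
    PySem.Dict.mk [("total", (0 : Int)), ("finalizados", 0), ("agendados", 0)] := by
  simp [pvSumm, calc_resumo_py_alt_summ]

lemma pvSumm_append (xs : List (List (String × String))) (item : List (String × String)) :
    ((pvSumm xs).modify "total" 0 (· + 1)).modify
      (if (PySem.Dict.mk item).get? "status" = some "Finalizado" then "finalizados" else "agendados")
      0 (· + 1) = pvSumm (xs ++ [item]) := by
  by_cases h : (PySem.Dict.mk item).get? "status" = some "Finalizado"
  · rw [if_pos h]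
    simp only [pvSumm, calc_resumo_py_alt_summ, List.countP_append, List.length_append,
      List.countP_singleton, h]
    simp [PySem.Dict.modify, PySem.Dict.insert, PySem.Dict.contains, PySem.Dict.getD,
      PySem.Dict.get?_mk_cons]
  · rw [if_neg h]
    have hb : ((PySem.Dict.mk item).get? "status" == some "Finalizado") = false := by
      simpa using h
    simp only [pvSumm, calc_resumo_py_alt_summ, List.countP_append, List.length_append,
      List.countP_singleton, hb]
    simp [PySem.Dict.modify, PySem.Dict.insert, PySem.Dict.contains, PySem.Dict.getD,
      PySem.Dict.get?_mk_cons]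
    omega

-- the step's status branch pushed inside the single modify at liga
lemma pv_ite_modify (c : Prop) [Decidable c] (d : PySem.Dict String (PySem.Dict String Int))
    (K : String) (e : PySem.Dict String Int) (k1 k2 : String) :
    (if c then d.modify K e (fun m => m.modify k1 0 (· + 1))
     else d.modify K e (fun m => m.modify k2 0 (· + 1))) =
      d.modify K e (fun m => m.modify (if c then k1 else k2) 0 (· + 1)) := by
  split <;> rfl

-- one step of each loop preserves the invariant tying A's counter dict to B's bucket dict
lemma pv_step_inv (d : PySem.Dict String (PySem.Dict String Int))
    (g : PySem.Dict String (List (List (String × String)))) (item : List (String × String))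
    (hk : d.keys = g.keys) (hnd : d.keys.Nodup)
    (hv : ∀ L, L ∈ d.keys → d.getD L (PySem.Dict.mk []) = pvSumm (g.getD L [])) :
    (calc_resumo_py_step d item).keys = (calc_resumo_py_alt_gstep g item).keys ∧
    (calc_resumo_py_step d item).keys.Nodup ∧
    ∀ L, L ∈ (calc_resumo_py_step d item).keys →
      (calc_resumo_py_step d item).getD L (PySem.Dict.mk []) =
        pvSumm ((calc_resumo_py_alt_gstep g item).getD L []) := by
  set K := (PySem.Dict.mk item).getD "liga" "Desconhecida" with hK
  set e : PySem.Dict String Int := PySem.Dict.mk [] with he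
  set init : PySem.Dict String Int :=
    PySem.Dict.mk [("total", (0 : Int)), ("finalizados", 0), ("agendados", 0)] with hinit
  set sk : String :=
    if (PySem.Dict.mk item).get? "status" = some "Finalizado" then "finalizados" else "agendados"
    with hsk
  set d1 : PySem.Dict String (PySem.Dict String Int) :=
    if d.contains K then d else d.insert K init with hd1
  have hstep : calc_resumo_py_step d item =
      (d1.modify K e (fun m => m.modify "total" 0 (· + 1))).modify K e
        (fun m => m.modify sk 0 (· + 1)) := by
    rw [hsk, ← pv_ite_modify]
    rfl
  have hgstep : calc_resumo_py_alt_gstep g item = g.modify K [] (· ++ [item]) := rfl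
  have hgc : g.contains K = d.contains K := by
    by_cases hc : d.contains K = true
    · rw [hc]; exact ((PySem.Dict.contains_iff_mem_keys g K).2
        (hk ▸ (PySem.Dict.contains_iff_mem_keys d K).1 hc))
    · rw [Bool.not_eq_true] at hc
      rw [hc]
      rw [← Bool.not_eq_true]
      intro hgk
      exact absurd ((PySem.Dict.contains_iff_mem_keys d K).2
        (hk ▸ (PySem.Dict.contains_iff_mem_keys g K).1 hgk)) (by simp [hc])
  have hd1k : d1.keys = if d.contains K then d.keys else d.keys ++ [K] := by
    rw [hd1]
    by_cases hc : d.contains K = true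
    · simp [hc]
    · rw [Bool.not_eq_true] at hc
      simp [hc, PySem.Dict.keys_insert_of_not_contains d init hc]
  have hd1c : d1.contains K = true := by
    rw [hd1]
    by_cases hc : d.contains K = true
    · simp [hc]
    · rw [Bool.not_eq_true] at hc
      simp [hc, PySem.Dict.contains_insert_self]
  have hkeys : (calc_resumo_py_step d item).keys = d1.keys := by
    rw [hstep, PySem.Dict.keys_modify, PySem.Dict.keys_insert_of_contains]
    · rw [PySem.Dict.keys_modify, PySem.Dict.keys_insert_of_contains]
      exact hd1c
    · rw [PySem.Dict.contains_iff_mem_keys, PySem.Dict.keys_modify,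
        PySem.Dict.keys_insert_of_contains _ _ hd1c, ← PySem.Dict.contains_iff_mem_keys]
      exact hd1c
  have hgk' : (calc_resumo_py_alt_gstep g item).keys =
      if d.contains K then g.keys else g.keys ++ [K] := by
    rw [hgstep, PySem.Dict.keys_modify]
    by_cases hc : d.contains K = true
    · simp [hc, PySem.Dict.keys_insert_of_contains _ _ (hgc ▸ hc)]
    · rw [Bool.not_eq_true] at hc
      simp [hc, PySem.Dict.keys_insert_of_not_contains _ _ (hgc ▸ hc)]
  have hKnotin : d.contains K = false → K ∉ d.keys := by
    intro hc hmem
    exact absurd ((PySem.Dict.contains_iff_mem_keys d K).2 hmem) (by simp [hc])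
  refine ⟨?_, ?_, ?_⟩
  · rw [hkeys, hd1k, hgk']
    by_cases hc : d.contains K = true <;> simp [hc, hk]
  · rw [hkeys, hd1k]
    by_cases hc : d.contains K = true
    · simpa [hc] using hnd
    · rw [Bool.not_eq_true] at hc
      rw [if_neg (by simp [hc]), List.nodup_append]
      refine ⟨hnd, List.nodup_singleton _, ?_⟩
      intro a ha b hb
      rw [List.mem_singleton] at hb
      subst hb
      exact fun hEq => hKnotin hc (hEq ▸ ha)
  · intro L hL
    by_cases hLK : L = K
    · rw [hLK, hstep, PySem.Dict.getD_modify_self, PySem.Dict.getD_modify_self,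
        hgstep, PySem.Dict.getD_modify_self]
      by_cases hc : d.contains K = true
      · have hKmem : K ∈ d.keys := (PySem.Dict.contains_iff_mem_keys d K).1 hc
        have hd1K : d1.getD K e = pvSumm (g.getD K []) := by
          rw [hd1]; simp [hc, hv K hKmem]
        rw [hd1K, hsk, pvSumm_append]
      · rw [Bool.not_eq_true] at hc
        have hd1K : d1.getD K e = init := by
          rw [hd1]; simp [hc, PySem.Dict.getD_insert_self]
        have hgK : g.getD K [] = [] :=
          PySem.Dict.getD_of_not_contains g [] (hgc ▸ hc)
        rw [hd1K, hgK, hinit, ← pvSumm_nil, hsk, pvSumm_append]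
    · have hLd : L ∈ d.keys := by
        rw [hkeys, hd1k] at hL
        by_cases hc : d.contains K = true
        · simpa [hc] using hL
        · rw [Bool.not_eq_true] at hc
          rw [if_neg (by simp [hc])] at hL
          rcases List.mem_append.1 hL with h | h
          · exact h
          · exact absurd (List.mem_singleton.1 h) hLK
      have hd1L : d1.getD L e = d.getD L e := by
        rw [hd1]
        by_cases hc : d.contains K = true
        · simp [hc]
        · rw [Bool.not_eq_true] at hc
          simp [hc, PySem.Dict.getD_insert_of_ne d init e hLK]
      rw [hstep, PySem.Dict.getD_modify_of_ne _ _ _ hLK, PySem.Dict.getD_modify_of_ne _ _ _ hLK,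
        hgstep, PySem.Dict.getD_modify_of_ne _ _ _ hLK, hd1L]
      exact hv L hLd

-- folding both loops from invariant-related states keeps them related
lemma pv_fold_inv (data : List (List (String × String))) :
    ∀ (d : PySem.Dict String (PySem.Dict String Int))
      (g : PySem.Dict String (List (List (String × String)))),
    d.keys = g.keys → d.keys.Nodup →
    (∀ L, L ∈ d.keys → d.getD L (PySem.Dict.mk []) = pvSumm (g.getD L [])) →
    (data.foldl calc_resumo_py_step d).keys = (data.foldl calc_resumo_py_alt_gstep g).keys ∧
    (data.foldl calc_resumo_py_step d).keys.Nodup ∧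
    ∀ L, L ∈ (data.foldl calc_resumo_py_step d).keys →
      (data.foldl calc_resumo_py_step d).getD L (PySem.Dict.mk []) =
        pvSumm ((data.foldl calc_resumo_py_alt_gstep g).getD L []) := by
  induction data with
  | nil => intro d g hk hnd hv; exact ⟨hk, hnd, hv⟩
  | cons item rest ih =>
      intro d g hk hnd hv
      obtain ⟨h1, h2, h3⟩ := pv_step_inv d g item hk hnd hv
      exact ih _ _ h1 h2 h3

-- ===== VERDICT (by name: the statement is the Claim_ definition above) =====
theorem calc_resumo_py_spec : Claim_equal_calc_resumo_py := by
  intro data _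
  unfold Spec_calc_resumo_py calc_resumo_py calc_resumo_py_alt
  obtain ⟨hk, hnd, hv⟩ := pv_fold_inv data PySem.Dict.empty PySem.Dict.empty
    (by simp [PySem.Dict.keys_empty]) (by simp [PySem.Dict.keys_empty])
    (by intro L hL; simp [PySem.Dict.keys_empty] at hL)
  rw [PySem.Dict.items_eq_map_keys _ hnd (PySem.Dict.mk []),
      PySem.Dict.items_eq_map_keys _ (hk ▸ hnd) ([])]
  rw [← hk]
  simp only [List.map_map]
  refine List.map_congr_left (fun L hL => ?_)
  simp only [Function.comp]
  rw [hv L hL]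
  rfl
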